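-- pv_equiv track=rewrite | github.com/anirudlappathi/Poshify | algorithm/color_algo.py | WinterMatch
-- ===== SOURCE A (Python) =====
-- def WinterMatch(outfit):
--     top = outfit[0]
--     bot = outfit[1]
--     shoes = outfit[2]
--
--     non_neutral = [color for color in outfit if color[0] != 'NEUTRAL']
--
--     dark_count = len([color for color in non_neutral if color[0] == 'DARK'])
--     if dark_count < 1: return False
--
--     bright_count = len(non_neutral) - dark_count
--     if bright_count > 0: return False
--
--     return True
-- ===== SOURCE B (Python) =====
-- def WinterMatch(outfit):
--     cats = {color[0] for color in outfit}
--     return 'DARK' in cats and not (cats - {'NEUTRAL', 'DARK'})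
-- ===== Notes on version B (the rewrite author's own statement) =====
-- stated objective: simpler
-- what changed: Replaces the non_neutral intermediate list, two counting passes and the early-return chain with one set of category labels and a membership-plus-set-difference test.
import Mathlib
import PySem

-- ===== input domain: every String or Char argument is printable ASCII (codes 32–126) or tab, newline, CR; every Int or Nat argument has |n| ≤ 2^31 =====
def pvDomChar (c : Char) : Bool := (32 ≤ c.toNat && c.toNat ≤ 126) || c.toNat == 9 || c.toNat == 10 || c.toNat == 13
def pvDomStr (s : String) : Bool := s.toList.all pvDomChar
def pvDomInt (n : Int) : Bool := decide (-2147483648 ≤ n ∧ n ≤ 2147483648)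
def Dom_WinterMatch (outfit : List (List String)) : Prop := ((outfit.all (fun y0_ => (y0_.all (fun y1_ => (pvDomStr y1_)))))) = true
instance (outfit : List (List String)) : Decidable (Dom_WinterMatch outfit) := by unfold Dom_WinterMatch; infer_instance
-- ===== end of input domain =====

-- B replaces A's non_neutral list and two counting passes with one set of category labels
-- and a membership + set-difference test (objective: simpler); equal wherever A returns.

-- ===== PORT A =====
-- color[0] : IndexError on an empty color is excluded by Pre_; total form pyGetD is exact there.
def WinterMatch (outfit : List (List String)) : Bool :=
  -- top = outfit[0]; bot = outfit[1]; shoes = outfit[2] are unused bindings: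
  -- their IndexError (outfits shorter than 3) is excluded by Pre_.
  let non_neutral := outfit.filter (fun color => !(PySem.List.pyGetD color 0 "" == "NEUTRAL"))
  let dark_count : Int := (non_neutral.filter (fun color => PySem.List.pyGetD color 0 "" == "DARK")).length
  if dark_count < 1 then false
  else
    let bright_count : Int := (non_neutral.length : Int) - dark_count
    if bright_count > 0 then false
    else true

-- ===== PORT B =====
def WinterMatch_alt (outfit : List (List String)) : Bool :=
  let cats : PySem.Set String := PySem.Set.ofList (outfit.map (fun color => PySem.List.pyGetD color 0 ""))
  PySem.Set.contains cats "DARK" && (PySem.Set.diff cats (PySem.Set.ofList ["NEUTRAL", "DARK"])).isEmpty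

-- ===== PRECONDITION & SPEC =====
-- A raises IndexError on outfits with fewer than 3 items (outfit[0..2]) and on any empty color (color[0]).
def Pre_WinterMatch (outfit : List (List String)) : Prop :=
  3 ≤ outfit.length ∧ ∀ color ∈ outfit, color ≠ []
instance (outfit : List (List String)) : Decidable (Pre_WinterMatch outfit) := by
  unfold Pre_WinterMatch; infer_instance
def pvWitness_WinterMatch : List (List String) := [["DARK"], ["NEUTRAL"], ["DARK"]]

def Spec_WinterMatch (outfit : List (List String)) (out : Bool) : Prop := out = WinterMatch_alt outfit
instance (outfit : List (List String)) (out : Bool) : Decidable (Spec_WinterMatch outfit out) := by unfold Spec_WinterMatch; infer_instance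

-- ===== CLAIM (what is proved, stated in full; the proofs are below) =====
def Claim_equal_WinterMatch : Prop := ∀ (outfit : List (List String)), Dom_WinterMatch outfit → Pre_WinterMatch outfit → Spec_WinterMatch outfit (WinterMatch outfit)

-- ===== LEMMAS AND PROOFS =====

-- dark filter commutes out of the non_neutral filter: DARK implies non-NEUTRAL
theorem pv_dk_eq (l : List (List String)) :
    (l.filter (fun c => !(PySem.List.pyGetD c 0 "" == "NEUTRAL"))).filter
        (fun c => PySem.List.pyGetD c 0 "" == "DARK")
      = l.filter (fun c => PySem.List.pyGetD c 0 "" == "DARK") := by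
  rw [List.filter_filter]
  apply List.filter_congr
  intro c _
  by_cases h : PySem.List.pyGetD c 0 "" = "DARK" <;> simp [h]

theorem pv_main_eq (l : List (List String)) : WinterMatch l = WinterMatch_alt l := by
  unfold WinterMatch WinterMatch_alt
  simp only [pv_dk_eq]
  set g : List String → String := fun c => PySem.List.pyGetD c 0 "" with hg
  set dk := l.filter (fun c => g c == "DARK") with hdk
  set nn := l.filter (fun c => !(g c == "NEUTRAL")) with hnn
  have hfq : nn.filter (fun c => g c == "DARK") = dk := by
    rw [hnn, hdk]; exact pv_dk_eq l
  have hdle : dk.length ≤ nn.length := by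
    rw [← hfq]; exact List.length_filter_le _ _
  rw [Bool.eq_iff_iff]
  constructor
  · intro hA
    split_ifs at hA with h1 h2
    have hd1 : 1 ≤ dk.length := by omega
    have hmd : nn.length = dk.length := by omega
    have hx : ∃ c ∈ l, g c = "DARK" := by
      rcases List.exists_mem_of_length_pos (by omega : 0 < dk.length) with ⟨c, hc⟩
      rw [hdk] at hc
      exact ⟨c, (List.mem_filter.mp hc).1, by simpa using (List.mem_filter.mp hc).2⟩
    have hall : ∀ c ∈ l, g c = "NEUTRAL" ∨ g c = "DARK" := by
      intro c hc
      by_cases hN : g c = "NEUTRAL"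
      · exact Or.inl hN
      · right
        have hcnn : c ∈ nn := by
          rw [hnn]; exact List.mem_filter.mpr ⟨hc, by simp [hN]⟩
        have hq : ∀ a ∈ nn, (fun c => g c == "DARK") a = true := by
          apply List.length_filter_eq_length_iff.mp
          rw [hfq]; omega
        simpa using hq c hcnn
    rcases hx with ⟨c, hcl, hcd⟩
    apply Bool.and_eq_true_iff.mpr
    constructor
    · rw [PySem.Set.contains_iff, PySem.Set.mem_ofList]
      exact List.mem_map.mpr ⟨c, hcl, hcd⟩
    · rw [List.isEmpty_iff, List.eq_nil_iff_forall_not_mem]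
      intro x hxm
      rw [PySem.Set.mem_diff, PySem.Set.mem_ofList, PySem.Set.mem_ofList] at hxm
      rcases hxm with ⟨hx1, hx2⟩
      rcases List.mem_map.mp hx1 with ⟨c', hc'l, rfl⟩
      rcases hall c' hc'l with h | h <;> simp [h] at hx2
  · intro hB
    rcases Bool.and_eq_true_iff.mp hB with ⟨hB1, hB2⟩
    have hx : ∃ c ∈ l, g c = "DARK" := by
      rw [PySem.Set.contains_iff, PySem.Set.mem_ofList] at hB1
      rcases List.mem_map.mp hB1 with ⟨c, hc, hcg⟩
      exact ⟨c, hc, hcg⟩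
    have hall : ∀ c ∈ l, g c = "NEUTRAL" ∨ g c = "DARK" := by
      intro c hc
      rw [List.isEmpty_iff, List.eq_nil_iff_forall_not_mem] at hB2
      by_contra hcon
      push Not at hcon
      exact hB2 (g c) (by
        rw [PySem.Set.mem_diff, PySem.Set.mem_ofList, PySem.Set.mem_ofList]
        exact ⟨List.mem_map.mpr ⟨c, hc, rfl⟩, by simpa using hcon⟩)
    have hd1 : 1 ≤ dk.length := by
      rcases hx with ⟨c, hcl, hcd⟩
      have hcm : c ∈ dk := by
        rw [hdk]; exact List.mem_filter.mpr ⟨hcl, by simp [hcd]⟩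
      have := List.length_pos_of_mem hcm
      omega
    have hmd : nn.length ≤ dk.length := by
      have hq : ∀ a ∈ nn, (fun c => g c == "DARK") a = true := by
        intro a ha
        rw [hnn] at ha
        rcases List.mem_filter.mp ha with ⟨hal, han⟩
        rcases hall a hal with h | h
        · simp [h] at han
        · simp [h]
      have := List.length_filter_eq_length_iff.mpr hq
      rw [hfq] at this
      omega
    split_ifs with h1 h2
    · omega
    · omega
    · rfl

-- ===== VERDICT (by name: the statement is the Claim_ definition above) =====
theorem WinterMatch_spec : Claim_equal_WinterMatch := by
  intro l _ _
  unfold Spec_WinterMatch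
  exact pv_main_eq l
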